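-- pv_equiv track=rewrite | github.com/GIftSibusiso/Beginner-exercises | team_allocator.py | dbn_physical_teams
-- ===== SOURCE A (Python) =====
-- def space_maker(string):
--     output = ""
--     for i in string:
--         if i != " ":
--             output += i
--     return output
--
-- def dbn_physical_teams(dbn_physical_students):
--     '''
--     from the list of dbn_physical_students create list of 4 students per team, and add them to
--     one big list
--     '''
--     dbn_physical_teams = []
--     team = []
--
--     for students in dbn_physical_students:
--         if len(team) == 4:
--             dbn_physical_teams.append(team)
--             team = []
--         team.append(space_maker(students).lower())
--
--     if len(team) > 0:
--         dbn_physical_teams.append(team)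
--
--     return dbn_physical_teams
-- ===== SOURCE B (Python) =====
-- def space_maker(string):
--     output = ""
--     for i in string:
--         if i != " ":
--             output += i
--     return output
--
-- def dbn_physical_teams(dbn_physical_students):
--     cleaned = [space_maker(s).lower() for s in dbn_physical_students]
--     return [cleaned[i:i + 4] for i in range(0, len(cleaned), 4)]
-- ===== Notes on version B (the rewrite author's own statement) =====
-- stated objective: simpler
-- what changed: B cleans all names in one comprehension pass and then groups by stride-4 slicing over range(0, n, 4), replacing A's stateful running-team accumulator with its length-test-and-flush branch and trailing flush.
import Mathlib
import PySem

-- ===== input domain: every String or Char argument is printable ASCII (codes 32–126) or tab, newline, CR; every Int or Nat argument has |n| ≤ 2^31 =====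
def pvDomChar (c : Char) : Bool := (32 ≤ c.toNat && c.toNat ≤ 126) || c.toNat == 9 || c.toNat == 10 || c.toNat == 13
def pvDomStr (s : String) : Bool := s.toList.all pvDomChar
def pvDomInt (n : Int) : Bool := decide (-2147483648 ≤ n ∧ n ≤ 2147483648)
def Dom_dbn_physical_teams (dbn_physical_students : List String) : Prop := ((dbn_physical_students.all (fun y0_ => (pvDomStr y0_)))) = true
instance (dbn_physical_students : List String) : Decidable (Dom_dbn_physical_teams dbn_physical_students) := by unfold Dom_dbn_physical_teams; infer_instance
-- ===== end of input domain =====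

-- B separates cleaning (one comprehension pass) from grouping (stride-4 slicing); same cost, simpler shape.

-- ===== PORT A =====
-- shared helper (Source B keeps space_maker verbatim): builds the space-free string char by char
def space_maker (string : String) : String :=
  String.ofList (string.toList.foldl (fun output i => if i != ' ' then output ++ [i] else output) [])

-- loop body of A's for-loop: flush a full team, then append the cleaned name
def team_step (st : List (List String) × List String) (students : String) :
    List (List String) × List String :=
  let st := if st.2.length == 4 then (st.1 ++ [st.2], ([] : List String)) else st
  (st.1, st.2 ++ [PySem.Str.lower (space_maker students)])

def dbn_physical_teams (dbn_physical_students : List String) : List (List String) :=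
  let st := dbn_physical_students.foldl team_step ([], [])
  if st.2.length > 0 then st.1 ++ [st.2] else st.1

-- ===== PORT B =====
def dbn_physical_teams_alt (dbn_physical_students : List String) : List (List String) :=
  let cleaned := dbn_physical_students.map (fun s => PySem.Str.lower (space_maker s))
  (PySem.List.pyRange 0 (cleaned.length : Int) 4).map
    (fun i => PySem.List.slice cleaned (some i) (some (i + 4)))

-- ===== PRECONDITION & SPEC =====
def Spec_dbn_physical_teams (dbn_physical_students : List String) (out : List (List String)) : Prop := out = dbn_physical_teams_alt dbn_physical_students
instance (dbn_physical_students : List String) (out : List (List String)) : Decidable (Spec_dbn_physical_teams dbn_physical_students out) := by unfold Spec_dbn_physical_teams; infer_instance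

-- ===== CLAIM (what is proved, stated in full; the proofs are below) =====
def Claim_equal_dbn_physical_teams : Prop := ∀ (dbn_physical_students : List String), Dom_dbn_physical_teams dbn_physical_students → Spec_dbn_physical_teams dbn_physical_students (dbn_physical_teams dbn_physical_students)

-- ===== LEMMAS AND PROOFS =====

-- reference chunking: successive groups of 4
def chunk4 {α : Type} (l : List α) : List (List α) :=
  if h : l = [] then [] else l.take 4 :: chunk4 (l.drop 4)
termination_by l.length
decreasing_by
  have : 0 < l.length := List.length_pos_iff.mpr h
  simp; omega

theorem chunk4_nil {α : Type} : chunk4 ([] : List α) = [] := by simp [chunk4]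

theorem chunk4_small {α : Type} (l : List α) (h : l ≠ []) (hle : l.length ≤ 4) :
    chunk4 l = [l] := by
  rw [chunk4]
  simp [h, List.take_of_length_le hle, List.drop_eq_nil_of_le hle, chunk4_nil]

theorem chunk4_cons4 {α : Type} (t l : List α) (h : t.length = 4) :
    chunk4 (t ++ l) = t :: chunk4 l := by
  have hne : t ++ l ≠ [] := by
    intro hc; have := congrArg List.length hc; simp [h] at this
  rw [chunk4]
  simp [hne, List.take_left' h, List.drop_left' h]

-- A's loop characterised: finishing from any partial team of size ≤ 4
theorem aloop_eq (xs : List String) : ∀ (acc : List (List String)) (team : List String),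
    team.length ≤ 4 →
    (let st := xs.foldl team_step (acc, team)
     if st.2.length > 0 then st.1 ++ [st.2] else st.1)
    = acc ++ chunk4 (team ++ xs.map (fun s => PySem.Str.lower (space_maker s))) := by
  induction xs with
  | nil =>
    intro acc team hle
    by_cases h : team = []
    · simp [h, chunk4_nil]
    · have : 0 < team.length := List.length_pos_iff.mpr h
      simp [chunk4_small team h hle, this]
  | cons s rest ih =>
    intro acc team hle
    by_cases h4 : team.length = 4
    · have hstep : team_step (acc, team) s = (acc ++ [team], [PySem.Str.lower (space_maker s)]) := by
        simp [team_step, h4]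
      simp only [List.foldl_cons, hstep]
      rw [ih (acc ++ [team]) [PySem.Str.lower (space_maker s)] (by simp)]
      simp [chunk4_cons4 team _ h4]
    · have hstep : team_step (acc, team) s = (acc, team ++ [PySem.Str.lower (space_maker s)]) := by
        simp [team_step, h4]
      simp only [List.foldl_cons, hstep]
      rw [ih acc (team ++ [PySem.Str.lower (space_maker s)]) (by simp; omega)]
      simp

theorem a_eq_chunk4 (xs : List String) :
    dbn_physical_teams xs = chunk4 (xs.map (fun s => PySem.Str.lower (space_maker s))) := by
  have := aloop_eq xs [] [] (by simp)
  simpa [dbn_physical_teams] using this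

-- the stride-4 range/slice comprehension, one element
theorem slice_stride (l : List String) (k : Nat) :
    PySem.List.slice l (some ((0 : Int) + 4 * (k : Int))) (some ((0 : Int) + 4 * (k : Int) + 4)) =
      (l.drop (4 * k)).take 4 := by
  have hs := PySem.List.slice_natCast_add l (4 * k) 4
  push_cast at hs ⊢
  simpa using hs

theorem range_chunk {α : Type} (n : Nat) : ∀ (l : List α), l.length = n →
    (List.range ((l.length + 3) / 4)).map (fun k => (l.drop (4 * k)).take 4) = chunk4 l := by
  induction n using Nat.strong_induction_on with
  | _ n ih =>
    intro l hn
    by_cases h : l = []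
    · simp [h, chunk4_nil]
    have hpos : 0 < l.length := List.length_pos_iff.mpr h
    have hm : (l.length + 3) / 4 = ((l.length - 4 + 3) / 4) + 1 := by omega
    rw [chunk4]
    simp only [h, dite_false]
    rw [hm, List.range_succ_eq_map, List.map_cons, List.map_map, Nat.mul_zero, List.drop_zero]
    congr 1
    have hdl : (l.drop 4).length = l.length - 4 := by simp
    have := ih (l.drop 4).length (by omega) (l.drop 4) rfl
    rw [hdl] at this
    rw [← this]
    apply List.map_congr_left
    intro k _
    simp [Function.comp, List.drop_drop]
    ring_nf

theorem b_eq_chunk4 (xs : List String) :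
    dbn_physical_teams_alt xs = chunk4 (xs.map (fun s => PySem.Str.lower (space_maker s))) := by
  simp only [dbn_physical_teams_alt]
  generalize xs.map (fun s => PySem.Str.lower (space_maker s)) = l
  rw [PySem.List.pyRange_of_pos 0 (l.length : Int) (by norm_num)]
  have hcount : (if (0 : Int) < (l.length : Int) then (((l.length : Int) - 0 + 4 - 1) / 4).toNat else 0)
      = (l.length + 3) / 4 := by
    split_ifs with hp
    · omega
    · omega
  rw [hcount, List.map_map, ← range_chunk l.length l rfl]
  apply List.map_congr_left
  intro k _
  simpa [Function.comp] using slice_stride l k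

-- ===== VERDICT (by name: the statement is the Claim_ definition above) =====
theorem dbn_physical_teams_spec : Claim_equal_dbn_physical_teams := by
  intro xs _
  unfold Spec_dbn_physical_teams
  rw [a_eq_chunk4, b_eq_chunk4]
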